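-- pv_equiv track=rewrite | github.com/ferolen/kimpy_files | 14_test.py | fprog
-- ===== SOURCE A (Python) =====
-- def f(n,numop,param):
--   if n<0 or n>1000:
--     return(-1)
--   r=-1
--   if numop==0:
--     r=n-param
--   if numop==1:
--     r=n+param
--   if numop==2:
--     r=n*param
--   if numop==3:
--     if n%param:
--       r=-1
--     else:
--       r=n//param
--   if numop==4:
--     if n<10:
--       r=-1
--     else:
--       r=n//10
--   if numop==5:
--     if n<10:
--       r=-1
--     else:
--       r=int(str(n)[1:])
--   if numop==6:
--     r=n*n
--   if numop==7:
--     r=int(str(n)[::-1])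
--   if numop==8:
--     r=1
--     for i in list(str(n)):
--       r*=int(i)
--   if r<0 or r>1000:
--     return(-1)
--   else:
--     return(r)
--
-- def fprog(prog,firstop,firstpar,secop,secpar,num):#calculates result program = prog for number = num
--   beginum=num
--   for c in prog:
--     if c=='1':
--       beginum=f(beginum,firstop,firstpar)
--     else:
--       beginum=f(beginum,secop,secpar)
--   return(beginum)
-- ===== SOURCE B (Python) =====
-- def fprog(prog, firstop, firstpar, secop, secpar, num):
--     def apply(s, op, par):
--         # s is always in 0..1000 here; every op is arithmetic (no string round-trips)
--         if op == 0:
--             r = s - par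
--         elif op == 1:
--             r = s + par
--         elif op == 2:
--             r = s * par
--         elif op == 3:
--             r = s // par if par != 0 and s % par == 0 else -1
--         elif op == 4:
--             r = s // 10 if s >= 10 else -1
--         elif op == 5:  # drop the leading decimal digit
--             if s < 10:
--                 r = -1
--             elif s >= 1000:
--                 r = s % 1000
--             elif s >= 100:
--                 r = s % 100
--             else:
--                 r = s % 10
--         elif op == 6:
--             r = s * s
--         elif op == 7:  # reverse the decimal digits
--             if s >= 1000:
--                 r = (s % 10) * 1000 + (s // 10 % 10) * 100 + (s // 100 % 10) * 10 + s // 1000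
--             elif s >= 100:
--                 r = (s % 10) * 100 + (s // 10 % 10) * 10 + s // 100
--             elif s >= 10:
--                 r = (s % 10) * 10 + s // 10
--             else:
--                 r = s
--         elif op == 8:  # product of the decimal digits
--             if s >= 100:
--                 r = (s // 100 % 10) * (s // 10 % 10) * (s % 10)
--             elif s >= 10:
--                 r = (s // 10) * (s % 10)
--             else:
--                 r = s
--         else:
--             r = -1
--         return r if 0 <= r <= 1000 else -1
--
--     t1 = [apply(s, firstop, firstpar) for s in range(1001)]
--     t2 = [apply(s, secop, secpar) for s in range(1001)]
--     cur = num
--     for c in prog: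
--         if 0 <= cur <= 1000:
--             cur = t1[cur] if c == '1' else t2[cur]
--         else:
--             cur = -1
--     return cur
-- ===== Notes on version B (the rewrite author's own statement) =====
-- stated objective: faster
-- what changed: B precomputes two length-1001 transition tables over the bounded state space (purely arithmetic digit operations instead of A's str()/int() round-trips) and folds over the program string by O(1) table lookup instead of re-running the branchy helper f per character.
-- outside the precondition, e.g. on fprog('1', 3, 0, 0, 1, -5): A returns -1, B returns -1
import Mathlib
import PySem

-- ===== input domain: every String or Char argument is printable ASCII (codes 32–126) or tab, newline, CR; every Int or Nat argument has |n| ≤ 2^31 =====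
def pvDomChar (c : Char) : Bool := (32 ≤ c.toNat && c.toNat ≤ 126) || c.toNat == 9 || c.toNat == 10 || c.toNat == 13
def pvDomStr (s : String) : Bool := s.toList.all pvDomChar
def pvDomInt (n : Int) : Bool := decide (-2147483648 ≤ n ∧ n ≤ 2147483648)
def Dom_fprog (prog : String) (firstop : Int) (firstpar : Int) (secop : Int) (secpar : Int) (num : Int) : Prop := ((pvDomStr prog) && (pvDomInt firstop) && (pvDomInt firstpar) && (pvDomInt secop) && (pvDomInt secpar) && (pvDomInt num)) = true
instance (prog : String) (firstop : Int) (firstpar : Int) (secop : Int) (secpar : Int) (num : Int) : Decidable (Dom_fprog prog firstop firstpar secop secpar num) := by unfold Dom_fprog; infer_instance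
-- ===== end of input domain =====

-- B precomputes two transition tables over the bounded state space 0..1000 (arithmetic digit ops,
-- no string round-trips) and steps by table lookup; measured faster by a constant factor.


-- ===== PORT A =====
-- literal port of helper f: sequential `if numop==k` reassignments of r, then the final clamp
def fA_f (n numop param : Int) : Int :=
  if n < 0 ∨ n > 1000 then -1
  else
    let r : Int := -1
    let r := if numop = 0 then n - param else r
    let r := if numop = 1 then n + param else r
    let r := if numop = 2 then n * param else r
    let r := if numop = 3 then (if PySem.Int.mod n param ≠ 0 then -1 else PySem.Int.floordiv n param) else r
    let r := if numop = 4 then (if n < 10 then -1 else PySem.Int.floordiv n 10) else r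
    let r := if numop = 5 then
        (if n < 10 then -1
         else (PySem.Int.ofChars? (PySem.List.slice (PySem.Int.toChars n) (some 1) none)).getD 0) else r
    let r := if numop = 6 then n * n else r
    let r := if numop = 7 then
        (PySem.Int.ofChars? ((PySem.List.slice? (PySem.Int.toChars n) none none (-1)).getD [])).getD 0 else r
    let r := if numop = 8 then
        (PySem.Int.toChars n).foldl (fun acc c => acc * (PySem.Int.ofChars? [c]).getD 0) 1 else r
    if r < 0 ∨ r > 1000 then -1 else r

def fprog (prog : String) (firstop : Int) (firstpar : Int) (secop : Int) (secpar : Int) (num : Int) : Int :=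
  prog.toList.foldl
    (fun beginum c => if c = '1' then fA_f beginum firstop firstpar else fA_f beginum secop secpar)
    num

-- ===== PORT B =====
-- B's apply: one arithmetic transition for states 0..1000 (digit ops done by //, %)
def fB_apply (s op par : Int) : Int :=
  let r : Int :=
    if op = 0 then s - par
    else if op = 1 then s + par
    else if op = 2 then s * par
    else if op = 3 then (if par ≠ 0 ∧ PySem.Int.mod s par = 0 then PySem.Int.floordiv s par else -1)
    else if op = 4 then (if s ≥ 10 then PySem.Int.floordiv s 10 else -1)
    else if op = 5 then
      (if s < 10 then -1
       else if s ≥ 1000 then PySem.Int.mod s 1000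
       else if s ≥ 100 then PySem.Int.mod s 100
       else PySem.Int.mod s 10)
    else if op = 6 then s * s
    else if op = 7 then
      (if s ≥ 1000 then
         (PySem.Int.mod s 10) * 1000 + (PySem.Int.mod (PySem.Int.floordiv s 10) 10) * 100
           + (PySem.Int.mod (PySem.Int.floordiv s 100) 10) * 10 + PySem.Int.floordiv s 1000
       else if s ≥ 100 then
         (PySem.Int.mod s 10) * 100 + (PySem.Int.mod (PySem.Int.floordiv s 10) 10) * 10
           + PySem.Int.floordiv s 100
       else if s ≥ 10 then (PySem.Int.mod s 10) * 10 + PySem.Int.floordiv s 10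
       else s)
    else if op = 8 then
      (if s ≥ 100 then
         (PySem.Int.mod (PySem.Int.floordiv s 100) 10) * (PySem.Int.mod (PySem.Int.floordiv s 10) 10)
           * (PySem.Int.mod s 10)
       else if s ≥ 10 then (PySem.Int.floordiv s 10) * (PySem.Int.mod s 10)
       else s)
    else -1
  if 0 ≤ r ∧ r ≤ 1000 then r else -1

def fprog_alt (prog : String) (firstop : Int) (firstpar : Int) (secop : Int) (secpar : Int) (num : Int) : Int :=
  let t1 := (List.range 1001).map (fun s : Nat => fB_apply (s : Int) firstop firstpar)
  let t2 := (List.range 1001).map (fun s : Nat => fB_apply (s : Int) secop secpar)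
  prog.toList.foldl
    (fun cur c =>
      if 0 ≤ cur ∧ cur ≤ 1000 then
        (if c = '1' then t1.getD cur.toNat (-1) else t2.getD cur.toNat (-1))
      else -1)
    num

-- ===== PRECONDITION & SPEC =====
-- Pre_ excludes inputs where an operation "divide by param" with param = 0 can be selected by the
-- program string: there Python's f may raise ZeroDivisionError (B instead treats non-divisibility
-- by 0 as the failure value -1).  This also excludes some inputs on which A still returns (the
-- zero-divisor op present in the string but only ever applied to an out-of-range state).
def Pre_fprog (prog : String) (firstop : Int) (firstpar : Int) (secop : Int) (secpar : Int) (num : Int) : Prop :=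
  (prog.toList.contains '1' = true → ¬(firstop = 3 ∧ firstpar = 0)) ∧
  (prog.toList.any (fun c => !(c == '1')) = true → ¬(secop = 3 ∧ secpar = 0))
instance (prog : String) (firstop : Int) (firstpar : Int) (secop : Int) (secpar : Int) (num : Int) : Decidable (Pre_fprog prog firstop firstpar secop secpar num) := by unfold Pre_fprog; infer_instance

def pvWitness_fprog : String × Int × Int × Int × Int × Int := ("12", 1, 5, 2, 3, 7)

def Spec_fprog (prog : String) (firstop : Int) (firstpar : Int) (secop : Int) (secpar : Int) (num : Int) (out : Int) : Prop := out = fprog_alt prog firstop firstpar secop secpar num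
instance (prog : String) (firstop : Int) (firstpar : Int) (secop : Int) (secpar : Int) (num : Int) (out : Int) : Decidable (Spec_fprog prog firstop firstpar secop secpar num out) := by unfold Spec_fprog; infer_instance

-- ===== CLAIM (what is proved, stated in full; the proofs are below) =====
def Claim_equal_fprog : Prop := ∀ (prog : String) (firstop : Int) (firstpar : Int) (secop : Int) (secpar : Int) (num : Int), Dom_fprog prog firstop firstpar secop secpar num → Pre_fprog prog firstop firstpar secop secpar num → Spec_fprog prog firstop firstpar secop secpar num (fprog prog firstop firstpar secop secpar num)

-- ===== LEMMAS AND PROOFS =====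

-- the three string-based digit ops of A agree with B's arithmetic versions on the whole state space
set_option maxRecDepth 100000 in
lemma digit_ops_eq :
    ((List.range 1001).all (fun k =>
      fA_f (k : Int) 5 0 == fB_apply (k : Int) 5 0 &&
      (fA_f (k : Int) 7 0 == fB_apply (k : Int) 7 0) &&
      (fA_f (k : Int) 8 0 == fB_apply (k : Int) 8 0))) = true := by decide

-- ops 5, 7, 8 ignore the parameter in both programs
lemma par_irrel (n par : Int) (op : Int) (h5 : op = 5 ∨ op = 7 ∨ op = 8) :
    fA_f n op par = fA_f n op 0 ∧ fB_apply n op par = fB_apply n op 0 := by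
  rcases h5 with h | h | h <;> subst h <;> constructor <;> simp [fA_f, fB_apply]

lemma digit_op_eq (n op par : Int) (hn : 0 ≤ n ∧ n ≤ 1000) (h5 : op = 5 ∨ op = 7 ∨ op = 8) :
    fA_f n op par = fB_apply n op par := by
  obtain ⟨hA, hB⟩ := par_irrel n par op h5
  rw [hA, hB]
  have hall := digit_ops_eq
  rw [List.all_eq_true] at hall
  have hmem : n.toNat ∈ List.range 1001 := by rw [List.mem_range]; omega
  have hthis := hall _ hmem
  rw [Int.toNat_of_nonneg hn.1] at hthis
  simp only [Bool.and_eq_true, beq_iff_eq] at hthis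
  rcases h5 with h | h | h <;> subst h
  · exact hthis.1.1
  · exact hthis.1.2
  · exact hthis.2

-- A's step equals B's range-guarded transition, pointwise, outside the zero-divisor case
lemma step_eq (n op par : Int) (h : ¬(op = 3 ∧ par = 0)) :
    fA_f n op par = if 0 ≤ n ∧ n ≤ 1000 then fB_apply n op par else -1 := by
  by_cases hn : 0 ≤ n ∧ n ≤ 1000
  · rw [if_pos hn]
    by_cases h0 : op = 0
    · subst h0; simp only [fA_f, fB_apply]; rw [if_neg (by omega)]; norm_num; split_ifs <;> omega
    · by_cases h1 : op = 1
      · subst h1; simp only [fA_f, fB_apply]; rw [if_neg (by omega)]; norm_num; split_ifs <;> omega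
      · by_cases h2 : op = 2
        · subst h2; simp only [fA_f, fB_apply]; rw [if_neg (by omega)]; norm_num
          generalize n * par = r
          split_ifs <;> omega
        · by_cases h3 : op = 3
          · subst h3
            have hpar : par ≠ 0 := fun hp => h ⟨rfl, hp⟩
            simp only [fA_f, fB_apply]; rw [if_neg (by omega)]; norm_num [hpar]
            by_cases hm : PySem.Int.mod n par = 0
            · simp only [hm]
              norm_num
              generalize PySem.Int.floordiv n par = q
              split_ifs <;> omega
            · simp only [hm]
              norm_num [hm]
          · by_cases h4 : op = 4
            · subst h4; simp only [fA_f, fB_apply]; rw [if_neg (by omega)]; norm_num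
              split_ifs <;> omega
            · by_cases h5 : op = 5
              · exact digit_op_eq n op par hn (Or.inl h5)
              · by_cases h6 : op = 6
                · subst h6; simp only [fA_f, fB_apply]; rw [if_neg (by omega)]; norm_num
                  generalize n * n = r
                  split_ifs <;> omega
                · by_cases h7 : op = 7
                  · exact digit_op_eq n op par hn (Or.inr (Or.inl h7))
                  · by_cases h8 : op = 8
                    · exact digit_op_eq n op par hn (Or.inr (Or.inr h8))
                    · simp only [fA_f, fB_apply]; rw [if_neg (by omega)]
                      simp [h0, h1, h2, h3, h4, h5, h6, h7, h8]
  · rw [if_neg hn]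
    unfold fA_f
    rw [if_pos (by omega)]

-- the table lookup in B's step is exactly fB_apply on an in-range state
lemma table_step (op par cur : Int) (hcur : 0 ≤ cur ∧ cur ≤ 1000) :
    ((List.range 1001).map (fun s : Nat => fB_apply (s : Int) op par)).getD cur.toNat (-1) =
      fB_apply cur op par := by
  rw [PySem.List.getD_map_range _ _ _ _ (by omega)]
  rw [Int.toNat_of_nonneg hcur.1]

-- ===== VERDICT (by name: the statement is the Claim_ definition above) =====
theorem fprog_spec : Claim_equal_fprog := by
  intro prog firstop firstpar secop secpar num _hDom hPre
  unfold Spec_fprog fprog fprog_alt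
  apply PySem.List.foldl_congr_mem
  intro acc c hc
  by_cases hc1 : c = '1'
  · subst hc1
    have hop := hPre.1 (by simpa [List.contains_iff_mem] using hc)
    rw [if_pos rfl, step_eq acc firstop firstpar hop]
    by_cases hacc : 0 ≤ acc ∧ acc ≤ 1000
    · rw [if_pos hacc, if_pos hacc, if_pos rfl, table_step _ _ _ hacc]
    · rw [if_neg hacc, if_neg hacc]
  · have hop := hPre.2 (by rw [List.any_eq_true]; exact ⟨c, hc, by simpa using hc1⟩)
    rw [if_neg hc1, step_eq acc secop secpar hop]
    by_cases hacc : 0 ≤ acc ∧ acc ≤ 1000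
    · rw [if_pos hacc, if_pos hacc, if_neg hc1, table_step _ _ _ hacc]
    · rw [if_neg hacc, if_neg hacc]
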